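-- pv_equiv track=rewrite | github.com/reitumetseseholoholo-svg/Study-Plan-APP-OSS | scripts/import_f7_syllabus_outcomes.py | _chapter_capability
-- ===== SOURCE A (Python) =====
-- def _chapter_capability(chapter: str) -> str:
--     """Return capability letter (A–E) for display."""
--     if "Conceptual Framework" in chapter or "International Financial Reporting" in chapter:
--         return "A"
--     if any(x in chapter for x in ["IAS 16", "IAS 38", "IAS 36", "Inventories", "Financial Instruments",
--                                    "IFRS 16", "IAS 37", "IAS 10", "IAS 12", "IAS 33", "IFRS 15",
--                                    "Government", "Foreign Currency", "IFRS 5"]):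
--         return "B"
--     if "Analysis and Interpretation" in chapter:
--         return "C"
--     if "Consolidat" in chapter or "IAS 7" in chapter or "IFRS 18" in chapter or "IAS 8" in chapter:
--         return "D"
--     return "E"
-- ===== SOURCE B (Python) =====
-- # B: no priority branching — a single min-accumulator pass over a flat
-- # (pattern, letter) list; group priority A<B<C<D<default E is exactly
-- # alphabetical order, so the smallest matching letter is the answer.
-- _PATTERN_LETTER = [
--     ("Conceptual Framework", "A"), ("International Financial Reporting", "A"),
--     ("IAS 16", "B"), ("IAS 38", "B"), ("IAS 36", "B"), ("Inventories", "B"),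
--     ("Financial Instruments", "B"), ("IFRS 16", "B"), ("IAS 37", "B"),
--     ("IAS 10", "B"), ("IAS 12", "B"), ("IAS 33", "B"), ("IFRS 15", "B"),
--     ("Government", "B"), ("Foreign Currency", "B"), ("IFRS 5", "B"),
--     ("Analysis and Interpretation", "C"),
--     ("Consolidat", "D"), ("IAS 7", "D"), ("IFRS 18", "D"), ("IAS 8", "D"),
-- ]
--
--
-- def _chapter_capability(chapter: str) -> str:
--     """Return capability letter (A–E) for display."""
--     best = "E"
--     for pattern, letter in _PATTERN_LETTER:
--         if pattern in chapter and letter < best: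
--             best = letter
--     return best
-- ===== Notes on version B (the rewrite author's own statement) =====
-- stated objective: alternative
-- what changed: Replaced the four priority-ordered early-return branches by an order-independent single pass that keeps the alphabetically minimal letter among all matching (pattern, letter) pairs, exploiting that the priority order A<B<C<D<E is exactly alphabetical.
import Mathlib
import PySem

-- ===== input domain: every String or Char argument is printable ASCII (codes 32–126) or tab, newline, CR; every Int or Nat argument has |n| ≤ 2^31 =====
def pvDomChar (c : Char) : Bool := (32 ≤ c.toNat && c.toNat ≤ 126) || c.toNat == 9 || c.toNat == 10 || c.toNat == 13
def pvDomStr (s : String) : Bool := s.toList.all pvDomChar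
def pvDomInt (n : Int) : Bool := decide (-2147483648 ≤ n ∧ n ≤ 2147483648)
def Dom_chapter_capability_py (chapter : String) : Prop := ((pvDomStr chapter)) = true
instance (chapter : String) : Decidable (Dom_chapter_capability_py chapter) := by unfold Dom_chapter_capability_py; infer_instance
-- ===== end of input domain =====

-- B replaces A's priority-ordered early-return branches by an order-independent min-accumulator
-- pass over a flat (pattern, letter) list (priority A<B<C<D<E is alphabetical); objective: alternative.

-- ===== PORT A =====
def chapter_capability_py (chapter : String) : String :=
  if PySem.Str.isIn "Conceptual Framework" chapter || PySem.Str.isIn "International Financial Reporting" chapter then "A"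
  else if (["IAS 16", "IAS 38", "IAS 36", "Inventories", "Financial Instruments",
            "IFRS 16", "IAS 37", "IAS 10", "IAS 12", "IAS 33", "IFRS 15",
            "Government", "Foreign Currency", "IFRS 5"].any (fun x => PySem.Str.isIn x chapter)) then "B"
  else if PySem.Str.isIn "Analysis and Interpretation" chapter then "C"
  else if PySem.Str.isIn "Consolidat" chapter || PySem.Str.isIn "IAS 7" chapter || PySem.Str.isIn "IFRS 18" chapter || PySem.Str.isIn "IAS 8" chapter then "D"
  else "E"

-- ===== PORT B =====
def patternLetter : List (String × String) :=
  [("Conceptual Framework", "A"), ("International Financial Reporting", "A"),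
   ("IAS 16", "B"), ("IAS 38", "B"), ("IAS 36", "B"), ("Inventories", "B"),
   ("Financial Instruments", "B"), ("IFRS 16", "B"), ("IAS 37", "B"),
   ("IAS 10", "B"), ("IAS 12", "B"), ("IAS 33", "B"), ("IFRS 15", "B"),
   ("Government", "B"), ("Foreign Currency", "B"), ("IFRS 5", "B"),
   ("Analysis and Interpretation", "C"),
   ("Consolidat", "D"), ("IAS 7", "D"), ("IFRS 18", "D"), ("IAS 8", "D")]

-- the loop of Source B: min-accumulator over the flat pattern list
def minScan (ps : List (String × String)) (chapter : String) (best : String) : String :=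
  match ps with
  | [] => best
  | (p, l) :: rest =>
      -- Python "letter < best": lexicographic code-point comparison, exact on ASCII
      minScan rest chapter (if PySem.Str.isIn p chapter && decide (l.toList < best.toList) then l else best)

def chapter_capability_py_alt (chapter : String) : String :=
  minScan patternLetter chapter "E"

-- ===== PRECONDITION & SPEC =====
def Spec_chapter_capability_py (chapter : String) (out : String) : Prop := out = chapter_capability_py_alt chapter
instance (chapter : String) (out : String) : Decidable (Spec_chapter_capability_py chapter out) := by unfold Spec_chapter_capability_py; infer_instance

-- ===== CLAIM (what is proved, stated in full; the proofs are below) =====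
def Claim_equal_chapter_capability_py : Prop := ∀ (chapter : String), Dom_chapter_capability_py chapter → Spec_chapter_capability_py chapter (chapter_capability_py chapter)

-- ===== LEMMAS AND PROOFS =====

theorem if_false_true {α : Type} (a b : α) : (if false = true then a else b) = b := rfl
theorem if_true_true {α : Type} (a b : α) : (if true = true then a else b) = a := rfl

theorem minScan_append (xs ys : List (String × String)) (c b : String) :
    minScan (xs ++ ys) c b = minScan ys c (minScan xs c b) := by
  induction xs generalizing b with
  | nil => simp [minScan]
  | cons hd tl ih => cases hd; simp [minScan, ih]

-- a segment whose letters are all L lowers the accumulator to L iff a pattern matches and L < best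
theorem minScan_const (ps : List String) (L c b : String) :
    minScan (ps.map (fun p => (p, L))) c b =
      if (ps.any (fun p => PySem.Str.isIn p c)) && decide (L.toList < b.toList) then L else b := by
  induction ps generalizing b with
  | nil => simp [minScan]
  | cons p rest ih =>
    simp only [List.map_cons, minScan, List.any_cons]
    by_cases hp : PySem.Str.isIn p c = true
    · by_cases hl : L.toList < b.toList
      · have hlb : decide (L.toList < b.toList) = true := decide_eq_true hl
        have hLL : decide (L.toList < L.toList) = false := decide_eq_false (lt_irrefl L.toList)
        simp only [hp, hlb, Bool.and_true, Bool.true_or, if_true, ih, hLL,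
          Bool.and_false, if_false_true]
      · have hlb : decide (L.toList < b.toList) = false := decide_eq_false hl
        simp only [hp, hlb, Bool.and_false, ih, if_false_true]
    · have hpf : PySem.Str.isIn p c = false := by rwa [Bool.not_eq_true] at hp
      simp only [hpf, Bool.false_and, Bool.false_or, ih, if_false_true]

theorem chapter_capability_py_eq_alt (c : String) :
    chapter_capability_py c = chapter_capability_py_alt c := by
  have hsplit : patternLetter =
      (["Conceptual Framework", "International Financial Reporting"].map (fun p => (p, "A"))) ++
      ((["IAS 16", "IAS 38", "IAS 36", "Inventories", "Financial Instruments",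
         "IFRS 16", "IAS 37", "IAS 10", "IAS 12", "IAS 33", "IFRS 15",
         "Government", "Foreign Currency", "IFRS 5"].map (fun p => (p, "B"))) ++
      ((["Analysis and Interpretation"].map (fun p => (p, "C"))) ++
      (["Consolidat", "IAS 7", "IFRS 18", "IAS 8"].map (fun p => (p, "D"))))) := by rfl
  have fAE : decide (("A" : String).toList < ("E" : String).toList) = true := by decide
  have fBA : decide (("B" : String).toList < ("A" : String).toList) = false := by decide
  have fBE : decide (("B" : String).toList < ("E" : String).toList) = true := by decide
  have fCA : decide (("C" : String).toList < ("A" : String).toList) = false := by decide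
  have fCB : decide (("C" : String).toList < ("B" : String).toList) = false := by decide
  have fCE : decide (("C" : String).toList < ("E" : String).toList) = true := by decide
  have fDA : decide (("D" : String).toList < ("A" : String).toList) = false := by decide
  have fDB : decide (("D" : String).toList < ("B" : String).toList) = false := by decide
  have fDC : decide (("D" : String).toList < ("C" : String).toList) = false := by decide
  have fDE : decide (("D" : String).toList < ("E" : String).toList) = true := by decide
  unfold chapter_capability_py_alt chapter_capability_py
  rw [hsplit, minScan_append, minScan_append, minScan_append]
  simp only [minScan_const, List.any_cons, List.any_nil, Bool.or_false, Bool.or_assoc]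
  by_cases hA : (PySem.Str.isIn "Conceptual Framework" c || PySem.Str.isIn "International Financial Reporting" c) = true <;>
  by_cases hB : (PySem.Str.isIn "IAS 16" c || (PySem.Str.isIn "IAS 38" c || (PySem.Str.isIn "IAS 36" c || (PySem.Str.isIn "Inventories" c || (PySem.Str.isIn "Financial Instruments" c || (PySem.Str.isIn "IFRS 16" c || (PySem.Str.isIn "IAS 37" c || (PySem.Str.isIn "IAS 10" c || (PySem.Str.isIn "IAS 12" c || (PySem.Str.isIn "IAS 33" c || (PySem.Str.isIn "IFRS 15" c || (PySem.Str.isIn "Government" c || (PySem.Str.isIn "Foreign Currency" c || PySem.Str.isIn "IFRS 5" c))))))))))))) = true <;>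
  by_cases hC : PySem.Str.isIn "Analysis and Interpretation" c = true <;>
  by_cases hD : (PySem.Str.isIn "Consolidat" c || (PySem.Str.isIn "IAS 7" c || (PySem.Str.isIn "IFRS 18" c || PySem.Str.isIn "IAS 8" c))) = true <;>
  simp only [Bool.not_eq_true] at hA hB hC hD <;>
  simp only [hA, hB, hC, hD, Bool.true_and, Bool.false_and, Bool.and_true, Bool.and_false,
    if_true, if_false, fAE, fBA, fBE, fCA, fCB, fCE, fDA, fDB, fDC, fDE,
    Bool.false_or, Bool.or_false, Bool.true_or, Bool.or_true, ite_true, ite_false, reduceIte, if_false_true, if_true_true]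

-- ===== VERDICT (by name: the statement is the Claim_ definition above) =====
theorem chapter_capability_py_spec : Claim_equal_chapter_capability_py := by
  intro c _
  exact chapter_capability_py_eq_alt c
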